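-- pv_equiv track=rewrite | github.com/omarthenmalai/SubwayScheduler | src/station_scraper.py | fix_station_name
-- ===== SOURCE A (Python) =====
-- def fix_station_name(station_name):
--     temp = station_name.split('-')
--     station_name = "-".join([x.lstrip().rstrip() for x in temp])
--     fixed_station_name = station_name
--
--     if station_name == "42 St Grand Central":
--         fixed_station_name = "Grand Central 42 St"
--
--     if station_name == "Atlantic Ave- Barclays Cty" or station_name == "Atlantic Av-Barclays Ctr":
--         fixed_station_name = "Atlantic Ave-Barclays Ctr"
--
--     if station_name == "Crown Hts Utica Av":
--         fixed_station_name = "Crown Heights-Utica Av"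
--
--     if station_name == "Pelham Plwy":
--         fixed_station_name = "Pelham Pkwy"
--
--     if station_name == "Times Sq-42 St":
--         fixed_station_name = "Times Square-42 St"
--
--     if station_name == "Eastern Parkway-Brooklyn Museum":
--         fixed_station_name = "Eastern Pkwy Brooklyn Museum"
--
--     if station_name == "34 St-Penn Station":
--         fixed_station_name = "34 St Penn Station"
--
--     if station_name == "B'way-Lafayette St" or station_name == "B\\'way-Lafayette St" or station_name == "Bleeker St":
--         fixed_station_name = "Bleecker St"
--
--     if station_name == "161 Yankee Stadium":
--         fixed_station_name = "161 St Yankee Stadium"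
--
--
--     if station_name == "Cathedral Pkwy (110 St)":
--         fixed_station_name = "Cathedral Parkway (110 St)"
--
--     if station_name == 'W 4 Wash Sq' or station_name == "W 4  St Wash Sq":
--         fixed_station_name = "W 4 St Wash Sq"
--
--     if station_name == "51 St":
--         fixed_station_name = "Lexington Ave/ 53 St"
--
--     if station_name == "Court Sq":
--         fixed_station_name = "Court Sq-23 St"
--
--     if station_name == "Forest Hills 71 Av":
--         fixed_station_name = "Forest Hills-71 Av"
--
--     if station_name == "Jay St MetroTech":
--         fixed_station_name = "Jay St-MetroTech"
--
--     if station_name == "Jackson Hts Roosevelt Av" or station_name == "Jackson Hts-Roosevelt Av":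
--         fixed_station_name = "Jackson Heights-Roosevelt Av"
--
--     return fixed_station_name
-- ===== SOURCE B (Python) =====
-- _RULES = [
--     (("42 St Grand Central",), "Grand Central 42 St"),
--     (("Atlantic Ave- Barclays Cty", "Atlantic Av-Barclays Ctr"), "Atlantic Ave-Barclays Ctr"),
--     (("Crown Hts Utica Av",), "Crown Heights-Utica Av"),
--     (("Pelham Plwy",), "Pelham Pkwy"),
--     (("Times Sq-42 St",), "Times Square-42 St"),
--     (("Eastern Parkway-Brooklyn Museum",), "Eastern Pkwy Brooklyn Museum"),
--     (("34 St-Penn Station",), "34 St Penn Station"),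
--     (("B'way-Lafayette St", "B\\'way-Lafayette St", "Bleeker St"), "Bleecker St"),
--     (("161 Yankee Stadium",), "161 St Yankee Stadium"),
--     (("Cathedral Pkwy (110 St)",), "Cathedral Parkway (110 St)"),
--     (("W 4 Wash Sq", "W 4  St Wash Sq"), "W 4 St Wash Sq"),
--     (("51 St",), "Lexington Ave/ 53 St"),
--     (("Court Sq",), "Court Sq-23 St"),
--     (("Forest Hills 71 Av",), "Forest Hills-71 Av"),
--     (("Jay St MetroTech",), "Jay St-MetroTech"),
--     (("Jackson Hts Roosevelt Av", "Jackson Hts-Roosevelt Av"), "Jackson Heights-Roosevelt Av"),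
-- ]
--
--
-- def fix_station_name(station_name):
--     # one pass over the characters: drop whitespace at both ends of every
--     # '-'-separated segment, keep interior whitespace
--     out = []
--     pending = []
--     started = False
--     for ch in station_name:
--         if ch == '-':
--             out.append('-')
--             pending = []
--             started = False
--         elif ch.isspace():
--             if started:
--                 pending.append(ch)
--         else:
--             out.extend(pending)
--             pending = []
--             out.append(ch)
--             started = True
--     name = ''.join(out)
--     for aliases, fixed in _RULES:
--         if name in aliases:
--             return fixed
--     return name
-- ===== Notes on version B (the rewrite author's own statement) =====
-- stated objective: alternative
-- what changed: Replaces A's split('-')/strip/join normalization plus 16 sequential override if-statements by a single character-level pass (a small state machine that drops whitespace at the ends of each '-'-separated segment) followed by a first-match scan of an alias-rules table.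
import Mathlib
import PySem

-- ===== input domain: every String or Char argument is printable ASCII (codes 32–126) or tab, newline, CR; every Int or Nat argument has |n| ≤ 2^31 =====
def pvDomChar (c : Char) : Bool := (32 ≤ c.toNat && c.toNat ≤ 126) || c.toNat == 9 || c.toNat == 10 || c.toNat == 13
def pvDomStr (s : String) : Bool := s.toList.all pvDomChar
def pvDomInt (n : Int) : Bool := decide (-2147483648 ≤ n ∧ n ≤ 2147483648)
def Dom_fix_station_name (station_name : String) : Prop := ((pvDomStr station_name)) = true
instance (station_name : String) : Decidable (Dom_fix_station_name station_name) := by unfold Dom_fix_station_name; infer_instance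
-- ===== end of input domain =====

-- B replaces A's split/strip/join plus 16-branch override cascade by a single character-level
-- pass (a small state machine dropping whitespace at segment boundaries) followed by a
-- first-match scan of an alias-rules table (objective: alternative).

-- ===== PORT A =====
def fix_station_name (station_name : String) : String :=
  let temp := (PySem.Str.split? station_name "-").getD []
  let station_name := PySem.Str.join "-" (temp.map (fun x => PySem.Str.rstrip (PySem.Str.lstrip x)))
  let fixed_station_name := station_name
  let fixed_station_name := if station_name = "42 St Grand Central" then "Grand Central 42 St" else fixed_station_name
  let fixed_station_name := if station_name = "Atlantic Ave- Barclays Cty" ∨ station_name = "Atlantic Av-Barclays Ctr" then "Atlantic Ave-Barclays Ctr" else fixed_station_name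
  let fixed_station_name := if station_name = "Crown Hts Utica Av" then "Crown Heights-Utica Av" else fixed_station_name
  let fixed_station_name := if station_name = "Pelham Plwy" then "Pelham Pkwy" else fixed_station_name
  let fixed_station_name := if station_name = "Times Sq-42 St" then "Times Square-42 St" else fixed_station_name
  let fixed_station_name := if station_name = "Eastern Parkway-Brooklyn Museum" then "Eastern Pkwy Brooklyn Museum" else fixed_station_name
  let fixed_station_name := if station_name = "34 St-Penn Station" then "34 St Penn Station" else fixed_station_name
  let fixed_station_name := if station_name = "B'way-Lafayette St" ∨ station_name = "B\\'way-Lafayette St" ∨ station_name = "Bleeker St" then "Bleecker St" else fixed_station_name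
  let fixed_station_name := if station_name = "161 Yankee Stadium" then "161 St Yankee Stadium" else fixed_station_name
  let fixed_station_name := if station_name = "Cathedral Pkwy (110 St)" then "Cathedral Parkway (110 St)" else fixed_station_name
  let fixed_station_name := if station_name = "W 4 Wash Sq" ∨ station_name = "W 4  St Wash Sq" then "W 4 St Wash Sq" else fixed_station_name
  let fixed_station_name := if station_name = "51 St" then "Lexington Ave/ 53 St" else fixed_station_name
  let fixed_station_name := if station_name = "Court Sq" then "Court Sq-23 St" else fixed_station_name
  let fixed_station_name := if station_name = "Forest Hills 71 Av" then "Forest Hills-71 Av" else fixed_station_name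
  let fixed_station_name := if station_name = "Jay St MetroTech" then "Jay St-MetroTech" else fixed_station_name
  let fixed_station_name := if station_name = "Jackson Hts Roosevelt Av" ∨ station_name = "Jackson Hts-Roosevelt Av" then "Jackson Heights-Roosevelt Av" else fixed_station_name
  fixed_station_name

-- ===== PORT B =====
-- the alias-rules table of Source B
def stationRules : List (List String × String) := [
    (["42 St Grand Central"], "Grand Central 42 St"),
    (["Atlantic Ave- Barclays Cty", "Atlantic Av-Barclays Ctr"], "Atlantic Ave-Barclays Ctr"),
    (["Crown Hts Utica Av"], "Crown Heights-Utica Av"),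
    (["Pelham Plwy"], "Pelham Pkwy"),
    (["Times Sq-42 St"], "Times Square-42 St"),
    (["Eastern Parkway-Brooklyn Museum"], "Eastern Pkwy Brooklyn Museum"),
    (["34 St-Penn Station"], "34 St Penn Station"),
    (["B'way-Lafayette St", "B\\'way-Lafayette St", "Bleeker St"], "Bleecker St"),
    (["161 Yankee Stadium"], "161 St Yankee Stadium"),
    (["Cathedral Pkwy (110 St)"], "Cathedral Parkway (110 St)"),
    (["W 4 Wash Sq", "W 4  St Wash Sq"], "W 4 St Wash Sq"),
    (["51 St"], "Lexington Ave/ 53 St"),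
    (["Court Sq"], "Court Sq-23 St"),
    (["Forest Hills 71 Av"], "Forest Hills-71 Av"),
    (["Jay St MetroTech"], "Jay St-MetroTech"),
    (["Jackson Hts Roosevelt Av", "Jackson Hts-Roosevelt Av"], "Jackson Heights-Roosevelt Av")]

-- Source B's for-loop over the characters, as structural recursion over the same state
-- (out, pending, started); the final `''.join(out)` drops the trailing pending whitespace
def normGo : List Char → List Char → List Char → Bool → List Char
  | [], out, _pending, _started => out
  | c :: rest, out, pending, started =>
    if c = '-' then normGo rest (out ++ ['-']) [] false
    else if PySem.Chars.isspace c then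
      (if started then normGo rest out (pending ++ [c]) started
       else normGo rest out pending started)
    else normGo rest (out ++ pending ++ [c]) [] true

-- Source B's second loop: return the first rule whose alias list contains the name
def lookupRules : List (List String × String) → String → String
  | [], name => name
  | (aliases, fixed) :: rest, name =>
    if aliases.contains name then fixed else lookupRules rest name

def fix_station_name_alt (station_name : String) : String :=
  let name := String.ofList (normGo station_name.toList [] [] false)
  lookupRules stationRules name

-- ===== PRECONDITION & SPEC =====
def Spec_fix_station_name (station_name : String) (out : String) : Prop := out = fix_station_name_alt station_name
instance (station_name : String) (out : String) : Decidable (Spec_fix_station_name station_name out) := by unfold Spec_fix_station_name; infer_instance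

-- ===== CLAIM (what is proved, stated in full; the proofs are below) =====
def Claim_equal_fix_station_name : Prop := ∀ (station_name : String), Dom_fix_station_name station_name → Spec_fix_station_name station_name (fix_station_name station_name)

-- ===== LEMMAS AND PROOFS =====

-- simple structural recursion computing Python's s.split('-')
def sp : List Char → List (List Char)
  | [] => [[]]
  | c :: r => if c = '-' then [] :: sp r else (sp r).modifyHead (c :: ·)

theorem sp_ne_nil (l : List Char) : sp l ≠ [] := by
  cases l with
  | nil => simp [sp]
  | cons c r =>
    simp only [sp]
    split
    · simp
    · cases h : sp r with
      | nil => exact absurd h (sp_ne_nil r)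
      | cons a t => simp

theorem go_eq_sp (fuel : Nat) : ∀ (l cur : List Char) (acc : List (List Char)), l.length ≤ fuel →
    PySem.Chars.splitOn.go ['-'] fuel l cur acc = acc.reverse ++ (sp l).modifyHead (cur.reverse ++ ·) := by
  induction fuel with
  | zero =>
    intro l cur acc h
    have : l = [] := List.eq_nil_of_length_eq_zero (Nat.le_zero.mp h)
    subst this
    simp [PySem.Chars.splitOn.go, sp]
  | succ fuel ih =>
    intro l cur acc h
    cases l with
    | nil => simp [PySem.Chars.splitOn.go, sp]
    | cons c rest =>
      by_cases hc : c = '-'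
      · subst hc
        have hpre : List.isPrefixOf ['-'] ('-' :: rest) = true := by simp [List.isPrefixOf]
        rw [PySem.Chars.splitOn.go, if_pos hpre]
        simp only [List.length_cons] at h
        rw [show List.drop ['-'].length ('-' :: rest) = rest from rfl,
            ih rest [] (cur.reverse :: acc) (Nat.le_of_succ_le_succ h)]
        cases hsp : sp rest with
        | nil => exact absurd hsp (sp_ne_nil rest)
        | cons a t => simp [sp, hsp]
      · have hpre : List.isPrefixOf ['-'] (c :: rest) = false := by
          simp [List.isPrefixOf]
          exact fun hh => absurd hh.symm hc
        rw [PySem.Chars.splitOn.go, if_neg (by simp [hpre])]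
        simp only [List.length_cons] at h
        rw [ih rest (c :: cur) acc (Nat.le_of_succ_le_succ h)]
        cases hsp : sp rest with
        | nil => exact absurd hsp (sp_ne_nil rest)
        | cons a t => simp [sp, hsp, hc]

theorem splitOn_eq_sp (l : List Char) : PySem.Chars.splitOn l ['-'] = sp l := by
  rw [PySem.Chars.splitOn, go_eq_sp (l.length + 1) l [] [] (Nat.le_succ _)]
  cases h : sp l with
  | nil => exact absurd h (sp_ne_nil l)
  | cons a t => simp

-- whitespace-handling facts about rstrip / strip
theorem dropWhile_append_cons (q : Char → Bool) (xs ys : List Char) (c : Char) (hc : q c = false) :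
    List.dropWhile q (xs ++ c :: ys) = List.dropWhile q xs ++ c :: ys := by
  rw [List.dropWhile_append]
  split
  · next he =>
    have : List.dropWhile q xs = [] := by simpa [List.isEmpty_iff] using he
    simp [this, hc]
  · rfl

theorem rstrip_all_space (p : List Char) (hp : ∀ c ∈ p, PySem.Chars.isspace c = true) :
    PySem.Chars.rstrip p = [] := by
  have h : List.dropWhile PySem.Chars.isspace p.reverse = [] :=
    List.dropWhile_eq_nil_iff.mpr (fun c hc => hp c (List.mem_reverse.mp hc))
  simp [PySem.Chars.rstrip, h]

theorem strip_nil : PySem.Chars.strip [] = [] := rfl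

theorem rstrip_append_cons (p h : List Char) (c : Char) (hc : PySem.Chars.isspace c = false) :
    PySem.Chars.rstrip (p ++ c :: h) = p ++ c :: PySem.Chars.rstrip h := by
  simp only [PySem.Chars.rstrip, List.reverse_append, List.reverse_cons]
  rw [show h.reverse ++ [c] ++ p.reverse = h.reverse ++ c :: p.reverse by simp,
      dropWhile_append_cons _ _ _ _ hc]
  simp

theorem strip_cons_space (c : Char) (x : List Char) (hc : PySem.Chars.isspace c = true) :
    PySem.Chars.strip (c :: x) = PySem.Chars.strip x := by
  simp [PySem.Chars.strip, PySem.Chars.lstrip, hc]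

theorem strip_cons_nonspace (c : Char) (x : List Char) (hc : PySem.Chars.isspace c = false) :
    PySem.Chars.strip (c :: x) = c :: PySem.Chars.rstrip x := by
  simp only [PySem.Chars.strip, PySem.Chars.lstrip, List.dropWhile_cons, hc]
  simpa using rstrip_append_cons [] x c hc

-- head segment and remainder of the normalized form
def spHead (l : List Char) : List Char := (sp l).headI

def spRest (l : List Char) : List Char :=
  match sp l with
  | [] => []
  | [_] => []
  | _ :: t => '-' :: PySem.Chars.join ['-'] (t.map PySem.Chars.strip)

theorem normSpec_eq (l : List Char) :
    PySem.Chars.join ['-'] ((sp l).map PySem.Chars.strip)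
      = PySem.Chars.strip (spHead l) ++ spRest l := by
  cases h : sp l with
  | nil => exact absurd h (sp_ne_nil l)
  | cons a t =>
    cases t with
    | nil => simp [PySem.Chars.join, List.intercalate, spHead, spRest, h]
    | cons b t' =>
      simp only [spHead, spRest, h, List.headI, List.map_cons, PySem.Chars.join]
      simp [List.intercalate, List.intersperse]

theorem spHead_dash (r : List Char) : spHead ('-' :: r) = [] := by simp [spHead, sp]

theorem spRest_dash (r : List Char) :
    spRest ('-' :: r) = '-' :: PySem.Chars.join ['-'] ((sp r).map PySem.Chars.strip) := by
  cases h : sp r with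
  | nil => exact absurd h (sp_ne_nil r)
  | cons a t => simp [spRest, sp, h]

theorem spHead_cons (c : Char) (r : List Char) (hc : c ≠ '-') : spHead (c :: r) = c :: spHead r := by
  cases h : sp r with
  | nil => exact absurd h (sp_ne_nil r)
  | cons a t => simp [spHead, sp, hc, h]

theorem spRest_cons (c : Char) (r : List Char) (hc : c ≠ '-') : spRest (c :: r) = spRest r := by
  cases h : sp r with
  | nil => exact absurd h (sp_ne_nil r)
  | cons a t => cases t <;> simp [spRest, sp, hc, h]

-- the machine invariant: normGo computes strip-per-segment, join with '-'
theorem normGo_inv (rest : List Char) :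
    (∀ (out pending : List Char), (∀ c ∈ pending, PySem.Chars.isspace c = true) →
      normGo rest out pending true = out ++ PySem.Chars.rstrip (pending ++ spHead rest) ++ spRest rest)
    ∧ (∀ out : List Char,
      normGo rest out [] false = out ++ PySem.Chars.strip (spHead rest) ++ spRest rest) := by
  induction rest with
  | nil =>
    constructor
    · intro out pending hp
      simp [normGo, spHead, spRest, sp, rstrip_all_space pending hp]
    · intro out
      simp [normGo, spHead, spRest, sp, PySem.Chars.strip, PySem.Chars.lstrip, PySem.Chars.rstrip]
  | cons c r ih =>
    by_cases hc : c = '-'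
    · subst hc
      have key : ∀ out : List Char,
          normGo r (out ++ ['-']) [] false
            = out ++ ['-'] ++ PySem.Chars.strip (spHead r) ++ spRest r := fun out => ih.2 _
      constructor
      · intro out pending hp
        rw [show normGo ('-' :: r) out pending true = normGo r (out ++ ['-']) [] false by simp [normGo],
            key, spHead_dash, spRest_dash]
        simp [rstrip_all_space pending hp, normSpec_eq]
      · intro out
        rw [show normGo ('-' :: r) out [] false = normGo r (out ++ ['-']) [] false by simp [normGo],
            key, spHead_dash, spRest_dash]
        simp [strip_nil, normSpec_eq]
    · by_cases hs : PySem.Chars.isspace c = true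
      · constructor
        · intro out pending hp
          rw [show normGo (c :: r) out pending true = normGo r out (pending ++ [c]) true by
                simp [normGo, hc, hs],
              ih.1 out (pending ++ [c]) (by
                intro d hd
                rcases List.mem_append.mp hd with h | h
                · exact hp d h
                · simpa [List.mem_singleton.mp h] using hs),
              spHead_cons c r hc, spRest_cons c r hc]
          simp
        · intro out
          rw [show normGo (c :: r) out [] false = normGo r out [] false by simp [normGo, hc, hs],
              ih.2 out, spHead_cons c r hc, spRest_cons c r hc,
              strip_cons_space c _ hs, PySem.Chars.strip]
      · have hs' : PySem.Chars.isspace c = false := by simpa using hs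
        constructor
        · intro out pending hp
          rw [show normGo (c :: r) out pending true = normGo r (out ++ pending ++ [c]) [] true by
                simp [normGo, hc, hs'],
              ih.1 (out ++ pending ++ [c]) [] (by simp),
              spHead_cons c r hc, spRest_cons c r hc,
              rstrip_append_cons pending (spHead r) c hs']
          simp
        · intro out
          rw [show normGo (c :: r) out [] false = normGo r (out ++ [] ++ [c]) [] true by
                simp [normGo, hc, hs'],
              ih.1 (out ++ [] ++ [c]) [] (by simp),
              spHead_cons c r hc, spRest_cons c r hc,
              strip_cons_nonspace c _ hs']
          simp [PySem.Chars.rstrip]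

-- Port B's normalization pass equals port A's split/strip/join normalization.
theorem norm_eq (s : String) :
    String.ofList (normGo s.toList [] [] false)
      = PySem.Str.join "-" ((((PySem.Str.split? s "-").getD []).map
          (fun x => PySem.Str.rstrip (PySem.Str.lstrip x)))) := by
  have hsplit : (PySem.Str.split? s "-").getD []
      = (sp s.toList).map String.ofList := by
    simp [PySem.Str.split?, PySem.Chars.split?, splitOn_eq_sp]
  have hmap : ((sp s.toList).map String.ofList).map (fun x => PySem.Str.rstrip (PySem.Str.lstrip x))
      = (sp s.toList).map (fun cs => String.ofList (PySem.Chars.strip cs)) := by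
    simp [List.map_map, PySem.Str.rstrip, PySem.Str.lstrip, PySem.Chars.strip, String.toList_ofList, Function.comp]
  have hj : List.map String.toList ((sp s.toList).map (fun cs => String.ofList (PySem.Chars.strip cs)))
      = (sp s.toList).map PySem.Chars.strip := by
    simp [List.map_map, String.toList_ofList, Function.comp]
  rw [hsplit, hmap, PySem.Str.join, hj, (normGo_inv s.toList).2 []]
  simp only [List.nil_append]
  rw [← normSpec_eq]
  rfl

-- A's 16-branch cascade equals B's first-match rule scan on every (normalized) name.
set_option maxHeartbeats 1000000 in
theorem chain_eq_scan (n : String) :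
    (let fixed_station_name := n
       let fixed_station_name := if n = "42 St Grand Central" then "Grand Central 42 St" else fixed_station_name
       let fixed_station_name := if n = "Atlantic Ave- Barclays Cty" ∨ n = "Atlantic Av-Barclays Ctr" then "Atlantic Ave-Barclays Ctr" else fixed_station_name
       let fixed_station_name := if n = "Crown Hts Utica Av" then "Crown Heights-Utica Av" else fixed_station_name
       let fixed_station_name := if n = "Pelham Plwy" then "Pelham Pkwy" else fixed_station_name
       let fixed_station_name := if n = "Times Sq-42 St" then "Times Square-42 St" else fixed_station_name
       let fixed_station_name := if n = "Eastern Parkway-Brooklyn Museum" then "Eastern Pkwy Brooklyn Museum" else fixed_station_name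
       let fixed_station_name := if n = "34 St-Penn Station" then "34 St Penn Station" else fixed_station_name
       let fixed_station_name := if n = "B'way-Lafayette St" ∨ n = "B\\'way-Lafayette St" ∨ n = "Bleeker St" then "Bleecker St" else fixed_station_name
       let fixed_station_name := if n = "161 Yankee Stadium" then "161 St Yankee Stadium" else fixed_station_name
       let fixed_station_name := if n = "Cathedral Pkwy (110 St)" then "Cathedral Parkway (110 St)" else fixed_station_name
       let fixed_station_name := if n = "W 4 Wash Sq" ∨ n = "W 4  St Wash Sq" then "W 4 St Wash Sq" else fixed_station_name
       let fixed_station_name := if n = "51 St" then "Lexington Ave/ 53 St" else fixed_station_name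
       let fixed_station_name := if n = "Court Sq" then "Court Sq-23 St" else fixed_station_name
       let fixed_station_name := if n = "Forest Hills 71 Av" then "Forest Hills-71 Av" else fixed_station_name
       let fixed_station_name := if n = "Jay St MetroTech" then "Jay St-MetroTech" else fixed_station_name
       let fixed_station_name := if n = "Jackson Hts Roosevelt Av" ∨ n = "Jackson Hts-Roosevelt Av" then "Jackson Heights-Roosevelt Av" else fixed_station_name
     fixed_station_name) = lookupRules stationRules n := by
  by_cases h0 : n = "42 St Grand Central"
  · subst h0; decide
  by_cases h1 : n = "Atlantic Ave- Barclays Cty"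
  · subst h1; decide
  by_cases h2 : n = "Atlantic Av-Barclays Ctr"
  · subst h2; decide
  by_cases h3 : n = "Crown Hts Utica Av"
  · subst h3; decide
  by_cases h4 : n = "Pelham Plwy"
  · subst h4; decide
  by_cases h5 : n = "Times Sq-42 St"
  · subst h5; decide
  by_cases h6 : n = "Eastern Parkway-Brooklyn Museum"
  · subst h6; decide
  by_cases h7 : n = "34 St-Penn Station"
  · subst h7; decide
  by_cases h8 : n = "B'way-Lafayette St"
  · subst h8; decide
  by_cases h9 : n = "B\\'way-Lafayette St"
  · subst h9; decide
  by_cases h10 : n = "Bleeker St"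
  · subst h10; decide
  by_cases h11 : n = "161 Yankee Stadium"
  · subst h11; decide
  by_cases h12 : n = "Cathedral Pkwy (110 St)"
  · subst h12; decide
  by_cases h13 : n = "W 4 Wash Sq"
  · subst h13; decide
  by_cases h14 : n = "W 4  St Wash Sq"
  · subst h14; decide
  by_cases h15 : n = "51 St"
  · subst h15; decide
  by_cases h16 : n = "Court Sq"
  · subst h16; decide
  by_cases h17 : n = "Forest Hills 71 Av"
  · subst h17; decide
  by_cases h18 : n = "Jay St MetroTech"
  · subst h18; decide
  by_cases h19 : n = "Jackson Hts Roosevelt Av"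
  · subst h19; decide
  by_cases h20 : n = "Jackson Hts-Roosevelt Av"
  · subst h20; decide
  simp [lookupRules, stationRules, h0, h1, h2, h3, h4, h5, h6, h7, h8, h9, h10, h11, h12, h13, h14, h15, h16, h17, h18, h19, h20]

-- ===== VERDICT (by name: the statement is the Claim_ definition above) =====
theorem fix_station_name_spec : Claim_equal_fix_station_name := by
  intro s _
  unfold Spec_fix_station_name
  simp only [fix_station_name, fix_station_name_alt]
  rw [← norm_eq s]
  exact chain_eq_scan _
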